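-- pv_equiv track=rewrite | github.com/kinzazu/sms-dump-analyzer | tshark_search/Parser.py | _fix_tp_da_key
-- ===== SOURCE A (Python) =====
-- def _fix_tp_da_key(map_gms_json):
--     """
--     Normalize the TP-Destination-Address key emitted by tshark.
--
--     Tshark sometimes names the field `TP-Destination-Address…`.  We want it
--     to be called `tp-destination-address` for downstream processing.
--     """
--     names = ['TP-Originating-Address', 'TP-Destination-Address', 'TP-Recipient-Address']
--     for name in names:
--         destination_address_keys = [key for key in map_gms_json.keys() if key.startswith(name)]
--         if destination_address_keys:
--             original_key = destination_address_keys[0]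
--             map_gms_json[name.lower()] = map_gms_json.pop(original_key)
--     return map_gms_json
-- ===== SOURCE B (Python) =====
-- def _fix_tp_da_key(map_gms_json):
--     """One pass over the keys records, for each target name, the first key with
--     that prefix; then each recorded key is popped and reinserted lowercased."""
--     names = ['TP-Originating-Address', 'TP-Destination-Address', 'TP-Recipient-Address']
--     first = {}
--     for key in map_gms_json.keys():
--         for name in names:
--             if name not in first and key.startswith(name):
--                 first[name] = key
--     for name in names:
--         if name in first:
--             map_gms_json[name.lower()] = map_gms_json.pop(first[name])
--     return map_gms_json
-- ===== Notes on version B (the rewrite author's own statement) =====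
-- stated objective: alternative
-- what changed: B replaces A's three separate scans of the key list (one per target name) with a single pass over the keys that records the first matching key for each name, then performs the three pop/reinsert moves from that record.
import Mathlib
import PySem

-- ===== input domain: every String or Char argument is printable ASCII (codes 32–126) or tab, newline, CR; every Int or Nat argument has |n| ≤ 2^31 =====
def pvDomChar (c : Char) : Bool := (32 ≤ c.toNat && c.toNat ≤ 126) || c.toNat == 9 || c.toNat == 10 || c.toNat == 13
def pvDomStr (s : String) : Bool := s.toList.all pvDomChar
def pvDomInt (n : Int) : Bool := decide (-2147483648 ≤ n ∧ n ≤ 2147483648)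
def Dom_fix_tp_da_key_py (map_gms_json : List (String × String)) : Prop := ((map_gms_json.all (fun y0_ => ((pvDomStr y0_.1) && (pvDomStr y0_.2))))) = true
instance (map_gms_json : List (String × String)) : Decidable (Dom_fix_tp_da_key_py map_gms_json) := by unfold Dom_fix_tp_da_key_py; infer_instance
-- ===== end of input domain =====

-- B finds, in ONE pass over the keys, the first key matching each target prefix, then moves those
-- keys to their lowercase names — replacing A's three separate key-scans (objective: alternative decomposition).


-- the literal `names` list both Pythons declare
def pvNames : List String := ["TP-Originating-Address", "TP-Destination-Address", "TP-Recipient-Address"]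

-- ===== PORT A =====
-- A's loop body: scan the CURRENT keys for the first one starting with `name`, pop it,
-- reinsert its value under `name.lower()`.
def pvFixNameA (d : PySem.Dict String String) (name : String) : PySem.Dict String String :=
  let destination_address_keys := d.keys.filter (fun key => PySem.Str.startswith key name)
  match destination_address_keys with
  | [] => d
  | original_key :: _ =>
    match d.pop? original_key with
    | some (v, d') => d'.insert (PySem.Str.lower name) v
    | none => d   -- unreachable: original_key was taken from d.keys

def fix_tp_da_key_py (map_gms_json : List (String × String)) : List (String × String) :=
  (pvNames.foldl pvFixNameA (PySem.Dict.ofList map_gms_json)).items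

-- ===== PORT B =====
-- B's first loop body (inner loop over the three names): record `key` as the first match for
-- `name` if none is recorded yet.
def pvRecordFirst (first : PySem.Dict String String) (key : String) : PySem.Dict String String :=
  pvNames.foldl
    (fun first name =>
      if !(first.contains name) && PySem.Str.startswith key name then first.insert name key
      else first)
    first

-- B's second loop body: if a first match was recorded for `name`, pop it and reinsert lowercased.
def pvMoveB (first : PySem.Dict String String) (d : PySem.Dict String String) (name : String) :
    PySem.Dict String String :=
  match first.get? name with
  | none => d
  | some k =>
    match d.pop? k with
    | some (v, d') => d'.insert (PySem.Str.lower name) v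
    | none => d   -- unreachable

def fix_tp_da_key_py_alt (map_gms_json : List (String × String)) : List (String × String) :=
  let d0 := PySem.Dict.ofList map_gms_json
  let first := d0.keys.foldl pvRecordFirst PySem.Dict.empty
  (pvNames.foldl (pvMoveB first) d0).items

-- ===== PRECONDITION & SPEC =====
def Spec_fix_tp_da_key_py (map_gms_json : List (String × String)) (out : List (String × String)) : Prop := out = fix_tp_da_key_py_alt map_gms_json
instance (map_gms_json : List (String × String)) (out : List (String × String)) : Decidable (Spec_fix_tp_da_key_py map_gms_json out) := by unfold Spec_fix_tp_da_key_py; infer_instance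

-- ===== CLAIM (what is proved, stated in full; the proofs are below) =====
def Claim_equal_fix_tp_da_key_py : Prop := ∀ (map_gms_json : List (String × String)), Dom_fix_tp_da_key_py map_gms_json → Spec_fix_tp_da_key_py map_gms_json (fix_tp_da_key_py map_gms_json)

-- ===== LEMMAS AND PROOFS =====

-- Two of the three target prefixes can never both be prefixes of the same key.
theorem pv_incompat {mname nname k : String}
    (h1 : ¬ mname.toList <+: nname.toList) (h2 : ¬ nname.toList <+: mname.toList)
    (hm : PySem.Str.startswith k mname = true) : PySem.Str.startswith k nname = false := by
  by_contra h
  rw [Bool.not_eq_false, PySem.Str.startswith_eq, PySem.Chars.startswith_iff] at h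
  rw [PySem.Str.startswith_eq, PySem.Chars.startswith_iff] at hm
  exact (List.prefix_or_prefix_of_prefix hm h).elim h1 h2

theorem pv_keys_erase (d : PySem.Dict String String) (k : String) :
    (d.erase k).keys = d.keys.filter (fun x => !(x == k)) := by
  unfold PySem.Dict.erase PySem.Dict.keys
  rw [List.filter_map]
  rfl

-- A's per-name move does not disturb the set of keys matching a DIFFERENT target prefix
-- (the moved key cannot match `nname`, and the lowercased key matches no target prefix).
theorem pv_filter_step (d : PySem.Dict String String) (mname nname : String)
    (hlow : PySem.Str.startswith (PySem.Str.lower mname) nname = false)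
    (hinc : ∀ k, PySem.Str.startswith k mname = true → PySem.Str.startswith k nname = false) :
    (pvFixNameA d mname).keys.filter (fun k => PySem.Str.startswith k nname)
      = d.keys.filter (fun k => PySem.Str.startswith k nname) := by
  unfold pvFixNameA
  rcases h : d.keys.filter (fun key => PySem.Str.startswith key mname) with _ | ⟨k, rest⟩
  · simp
  · have hk : k ∈ d.keys.filter (fun key => PySem.Str.startswith key mname) := by
      rw [h]; exact List.mem_cons_self
    have hpm : PySem.Str.startswith k mname = true := (List.mem_filter.mp hk).2
    have hkmem : k ∈ d.keys := (List.mem_filter.mp hk).1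
    have hget : d.get? k ≠ none := fun hn =>
      (PySem.Dict.get?_eq_none_iff_not_mem_keys d k).mp hn hkmem
    obtain ⟨v, hv⟩ := Option.ne_none_iff_exists'.mp hget
    have hrest : ∀ dd : PySem.Dict String String,
        dd.keys = d.keys.filter (fun x => !(x == k)) →
        dd.keys.filter (fun kk => PySem.Str.startswith kk nname)
          = d.keys.filter (fun kk => PySem.Str.startswith kk nname) := by
      intro dd hdd
      rw [hdd, List.filter_comm]
      apply List.filter_eq_self.mpr
      intro a ha
      have hpa : PySem.Str.startswith a nname = true := (List.mem_filter.mp ha).2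
      have hak : a ≠ k := fun hek => by
        rw [hek] at hpa; rw [hinc k hpm] at hpa; exact Bool.false_ne_true hpa
      simpa using hak
    have hkeys : (d.erase k).keys = d.keys.filter (fun x => !(x == k)) := pv_keys_erase d k
    simp only [PySem.Dict.pop?, hv, Option.map_some]
    rcases hc : (d.erase k).contains (PySem.Str.lower mname) with _ | _
    · rw [PySem.Dict.keys_insert_of_not_contains _ _ hc, List.filter_append, hrest _ hkeys]
      have hlow' := hlow
      rw [PySem.Str.startswith_eq, PySem.Str.toList_lower] at hlow'
      simp [hlow']
    · rw [PySem.Dict.keys_insert_of_contains _ _ hc]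
      exact hrest _ hkeys

-- what one step of B's recording loop does to the entry for one fixed target name
theorem pv_record_get (n : String) (hn : n ∈ pvNames) (f : PySem.Dict String String) (key : String) :
    (pvRecordFirst f key).get? n =
      if !(f.contains n) && PySem.Str.startswith key n then some key else f.get? n := by
  unfold pvRecordFirst pvNames
  fin_cases hn <;>
    · simp only [List.foldl]
      split_ifs <;>
        simp_all [PySem.Dict.get?_insert, PySem.Dict.contains_insert]

-- B's recording loop computes, for each target name, the FIRST key of the scanned list that
-- matches it (on top of what the accumulator already recorded).
theorem pv_record_fold (n : String) (hn : n ∈ pvNames) :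
    ∀ (ks : List String) (f : PySem.Dict String String),
      (ks.foldl pvRecordFirst f).get? n =
        (f.get? n).or ((ks.filter (fun k => PySem.Str.startswith k n)).head?) := by
  intro ks
  induction ks with
  | nil => intro f; simp
  | cons k ks ih =>
    intro f
    simp only [List.foldl_cons, List.filter_cons]
    rw [ih, pv_record_get n hn, PySem.Dict.contains_eq_isSome_get?]
    rcases hs : PySem.Str.startswith k n with _ | _
    · simp
    · rcases hf : f.get? n with _ | v <;> simp_all

-- B's move step with the recorded first match equals A's scan-and-move step, whenever the
-- recorded entry is the head of the current matching-key list.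
theorem pv_move_eq (first : PySem.Dict String String) (d : PySem.Dict String String) (n : String)
    (h : first.get? n = (d.keys.filter (fun key => PySem.Str.startswith key n)).head?) :
    pvMoveB first d n = pvFixNameA d n := by
  unfold pvMoveB pvFixNameA
  rcases hl : d.keys.filter (fun key => PySem.Str.startswith key n) with _ | ⟨k, rest⟩ <;>
    · rw [hl] at h; simp only [List.head?] at h; rw [h]

-- ===== VERDICT (by name: the statement is the Claim_ definition above) =====
theorem fix_tp_da_key_py_spec : Claim_equal_fix_tp_da_key_py := by
  intro m _
  unfold Spec_fix_tp_da_key_py fix_tp_da_key_py fix_tp_da_key_py_alt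
  set d0 := PySem.Dict.ofList m with hd0
  set first := d0.keys.foldl pvRecordFirst PySem.Dict.empty with hfirst
  have hget : ∀ n ∈ pvNames,
      first.get? n = (d0.keys.filter (fun key => PySem.Str.startswith key n)).head? := by
    intro n hn
    rw [hfirst, pv_record_fold n hn]
    simp
  -- pairwise incompatibility and lowercase facts for the three literal names
  have i12 : ∀ k, PySem.Str.startswith k "TP-Originating-Address" = true →
      PySem.Str.startswith k "TP-Destination-Address" = false :=
    fun k => pv_incompat (by decide) (by decide)
  have i13 : ∀ k, PySem.Str.startswith k "TP-Originating-Address" = true →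
      PySem.Str.startswith k "TP-Recipient-Address" = false :=
    fun k => pv_incompat (by decide) (by decide)
  have i23 : ∀ k, PySem.Str.startswith k "TP-Destination-Address" = true →
      PySem.Str.startswith k "TP-Recipient-Address" = false :=
    fun k => pv_incompat (by decide) (by decide)
  have h1 := hget "TP-Originating-Address" (by decide)
  have h2 := hget "TP-Destination-Address" (by decide)
  have h3 := hget "TP-Recipient-Address" (by decide)
  simp only [pvNames, List.foldl]
  rw [pv_move_eq first d0 _ h1]
  rw [pv_move_eq first (pvFixNameA d0 "TP-Originating-Address") "TP-Destination-Address" (by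
    rw [h2, ← pv_filter_step d0 "TP-Originating-Address" "TP-Destination-Address" (by decide) i12])]
  rw [pv_move_eq first (pvFixNameA (pvFixNameA d0 "TP-Originating-Address") "TP-Destination-Address")
    "TP-Recipient-Address" (by
    rw [h3,
      ← pv_filter_step d0 "TP-Originating-Address" "TP-Recipient-Address" (by decide) i13,
      ← pv_filter_step _ "TP-Destination-Address" "TP-Recipient-Address" (by decide) i23])]
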